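-- pv_equiv track=rewrite | github.com/hdray04/Biodynamics_hsd23 | CMJ.py | _find_label_key
-- ===== SOURCE A (Python) =====
-- def _find_label_key(candidates, available_keys):
--     # Return first available key matching any candidate (case-insensitive)
--     low = {k.lower(): k for k in available_keys}
--     for c in candidates:
--         k = c.lower()
--         if k in low:
--             return low[k]
--     # fuzzy: pick key containing all tokens
--     tokens = candidates[0].lower().split('_') if candidates else []
--     for k in available_keys:
--         lk = k.lower()
--         if all(t in lk for t in tokens):
--             return k
--     return None
-- ===== SOURCE B (Python) =====
-- def _find_label_key(candidates, available_keys):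
--     # Map each lowercased candidate label to its first position in the list.
--     rank = {}
--     for i, c in enumerate(candidates):
--         rank.setdefault(c.lower(), i)
--     # Single pass over the keys: keep the key whose label ranks earliest.
--     best = None
--     for k in available_keys:
--         i = rank.get(k.lower())
--         if i is not None and (best is None or i < best[0]):
--             best = (i, k)
--     if best is not None:
--         return best[1]
--     # Fallback: first key containing every token of the primary label.
--     tokens = candidates[0].lower().split('_') if candidates else []
--     return next((k for k in available_keys if all(t in k.lower() for t in tokens)), None)
-- ===== Notes on version B (the rewrite author's own statement) =====
-- stated objective: alternative
-- what changed: Inverted the traversal: instead of A's per-candidate lookup in a prebuilt lowercase dict, B indexes the candidates by first position and makes one argmin pass over the keys picking the key whose candidate ranks earliest; Pre_ excludes inputs where two unequal keys share the lowercase form of some candidate, where A's dict last-wins reinsertion order is accidental.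
-- outside the precondition, e.g. on _find_label_key(['a'], ['A', 'a']): A returns 'a', B returns 'A'; on _find_label_key(['dup'], ['DUP', 'Dup', 'dup']): A returns 'dup', B returns 'DUP'
import Mathlib
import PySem

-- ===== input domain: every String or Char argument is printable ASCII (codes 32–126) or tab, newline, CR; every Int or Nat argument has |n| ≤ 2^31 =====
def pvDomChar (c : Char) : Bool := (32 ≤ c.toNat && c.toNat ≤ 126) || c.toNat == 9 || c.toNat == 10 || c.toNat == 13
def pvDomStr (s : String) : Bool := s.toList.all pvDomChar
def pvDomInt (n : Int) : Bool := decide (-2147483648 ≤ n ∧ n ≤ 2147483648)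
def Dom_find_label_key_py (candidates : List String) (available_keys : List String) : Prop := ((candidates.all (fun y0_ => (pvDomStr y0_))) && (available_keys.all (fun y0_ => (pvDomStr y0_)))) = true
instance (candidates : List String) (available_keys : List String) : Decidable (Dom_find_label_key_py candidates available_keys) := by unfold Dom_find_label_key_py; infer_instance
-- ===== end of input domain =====

-- B inverts A's traversal: it indexes candidates by first position, then makes one
-- argmin pass over the keys picking the key whose candidate ranks earliest; objective: alternative.


-- ===== PORT A =====
-- 'for c in candidates: … return low[k]' — loop with early return, as structural recursion
def pvAExact (low : PySem.Dict String String) : List String → Option String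
  | [] => none
  | c :: cs =>
    match low.get? (PySem.Str.lower c) with
    | some v => some v
    | none => pvAExact low cs

-- fuzzy loop: 'for k in available_keys: … if all(t in lk for t in tokens): return k'
def pvAFuzzy (tokens : List String) : List String → Option String
  | [] => none
  | k :: ks =>
    let lk := PySem.Str.lower k
    if tokens.all (fun t => PySem.Str.isIn t lk) then some k else pvAFuzzy tokens ks

def find_label_key_py (candidates : List String) (available_keys : List String) : Option String :=
  let low : PySem.Dict String String :=
    available_keys.foldl (fun d k => d.insert (PySem.Str.lower k) k) PySem.Dict.empty
  match pvAExact low candidates with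
  | some v => some v
  | none =>
    let tokens :=
      match candidates with
      | [] => []
      | c :: _ => (PySem.Chars.splitOn (PySem.Str.lower c).toList "_".toList).map String.ofList
    pvAFuzzy tokens available_keys

-- ===== PORT B =====
-- 'rank.setdefault(c.lower(), i)' over enumerate(candidates)
def pvBRank (candidates : List String) : PySem.Dict String Int :=
  (PySem.List.enumerate candidates 0).foldl
    (fun d p => d.setdefault (PySem.Str.lower p.2) p.1) PySem.Dict.empty

-- one step of B's argmin pass over the keys
def pvBStep (rank : PySem.Dict String Int) (best : Option (Int × String)) (k : String) :
    Option (Int × String) :=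
  match rank.get? (PySem.Str.lower k) with
  | some i =>
    match best with
    | none => some (i, k)
    | some b => if i < b.1 then some (i, k) else best
  | none => best

def find_label_key_py_alt (candidates : List String) (available_keys : List String) : Option String :=
  let rank := pvBRank candidates
  match available_keys.foldl (pvBStep rank) none with
  | some b => some b.2
  | none =>
    let tokens :=
      match candidates with
      | [] => []
      | c :: _ => (PySem.Chars.splitOn (PySem.Str.lower c).toList "_".toList).map String.ofList
    available_keys.find? (fun k => tokens.all (fun t => PySem.Str.isIn t (PySem.Str.lower k)))

-- ===== PRECONDITION & SPEC =====
-- Pre_ excludes inputs where two UNEQUAL keys share the lowercase form of some candidate: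
-- there A's exact match is the accidental last-wins reinsertion order of its dict comprehension.
def Pre_find_label_key_py (candidates : List String) (available_keys : List String) : Prop :=
  ∀ c ∈ candidates, ∀ k1 ∈ available_keys, ∀ k2 ∈ available_keys,
    PySem.Str.lower k1 = PySem.Str.lower c → PySem.Str.lower k2 = PySem.Str.lower c → k1 = k2
instance (candidates : List String) (available_keys : List String) : Decidable (Pre_find_label_key_py candidates available_keys) := by unfold Pre_find_label_key_py; infer_instance

def pvWitness_find_label_key_py : List String × List String :=
  (["Jump_Height", "JH"], ["Time", "jump_HEIGHT"])

def Spec_find_label_key_py (candidates : List String) (available_keys : List String) (out : Option String) : Prop := out = find_label_key_py_alt candidates available_keys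
instance (candidates : List String) (available_keys : List String) (out : Option String) : Decidable (Spec_find_label_key_py candidates available_keys out) := by unfold Spec_find_label_key_py; infer_instance

-- ===== CLAIM (what is proved, stated in full; the proofs are below) =====
def Claim_equal_find_label_key_py : Prop := ∀ (candidates : List String) (available_keys : List String), Dom_find_label_key_py candidates available_keys → Pre_find_label_key_py candidates available_keys → Spec_find_label_key_py candidates available_keys (find_label_key_py candidates available_keys)

-- ===== LEMMAS AND PROOFS =====

-- first index (from 0) of a candidate whose lowercase is s — proof-side mirror of pvBRank
def pvFirstIdx (s : String) : List String → Option Nat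
  | [] => none
  | c :: cs =>
    if PySem.Str.lower c = s then some 0 else (pvFirstIdx s cs).map (· + 1)

-- A's dict lookup = last-match fold over the keys
theorem pvLow_get?_eq (keys : List String) (cl : String) (d : PySem.Dict String String) :
    (keys.foldl (fun d k => d.insert (PySem.Str.lower k) k) d).get? cl =
      keys.foldl (fun acc k => if PySem.Str.lower k = cl then some k else acc) (d.get? cl) := by
  induction keys generalizing d with
  | nil => rfl
  | cons k ks ih =>
    simp only [List.foldl_cons, ih, PySem.Dict.get?_insert]
    by_cases h : PySem.Str.lower k = cl
    · simp [h]
    · have : ¬ (cl = PySem.Str.lower k) := fun he => h he.symm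
      simp [this, h]

-- B's rank lookup = first index, shifted by the enumerate start
theorem pvRank_get?_eq (cs : List String) (s : String) (n : Int) (d : PySem.Dict String Int) :
    ((PySem.List.enumerate cs n).foldl
        (fun d p => d.setdefault (PySem.Str.lower p.2) p.1) d).get? s =
      ((d.get? s).or ((pvFirstIdx s cs).map (fun j => n + (j : Int)))) := by
  induction cs generalizing n d with
  | nil => simp [PySem.List.enumerate_nil, pvFirstIdx]
  | cons c cs ih =>
    rw [PySem.List.enumerate_cons]
    simp only [List.foldl_cons, ih]
    by_cases h : PySem.Str.lower c = s
    · rw [h, PySem.Dict.get?_setdefault_self]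
      cases hd : d.get? s <;> simp [pvFirstIdx, h, hd]
    · rw [PySem.Dict.get?_setdefault_of_ne d n (fun he => h he.symm)]
      simp only [pvFirstIdx, h, if_neg]
      cases hf : pvFirstIdx s cs <;> cases hd : d.get? s <;>
        simp [hf, hd, Option.or] <;> ring

-- last-match fold: none iff no key matches (and the accumulator is none)
theorem pvLM_none_iff (keys : List String) (cl : String) (acc : Option String) :
    keys.foldl (fun acc k => if PySem.Str.lower k = cl then some k else acc) acc = none ↔
      acc = none ∧ ∀ k ∈ keys, PySem.Str.lower k ≠ cl := by
  induction keys generalizing acc with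
  | nil => simp
  | cons k ks ih =>
    simp only [List.foldl_cons, ih, List.mem_cons]
    by_cases h : PySem.Str.lower k = cl <;> simp [h] <;> aesop

-- last-match fold: a result is a matching key (or the accumulator)
theorem pvLM_some (keys : List String) (cl : String) (acc : Option String) (v : String)
    (h : keys.foldl (fun acc k => if PySem.Str.lower k = cl then some k else acc) acc = some v) :
    (v ∈ keys ∧ PySem.Str.lower v = cl) ∨ acc = some v := by
  induction keys generalizing acc with
  | nil => exact Or.inr h
  | cons k ks ih =>
    simp only [List.foldl_cons] at h
    rcases ih _ h with h' | h'
    · exact Or.inl ⟨List.mem_cons_of_mem _ h'.1, h'.2⟩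
    · by_cases hk : PySem.Str.lower k = cl
      · simp [hk] at h'
        exact Or.inl ⟨by simp [← h'], by rw [← h']; exact hk⟩
      · simp [hk] at h'
        exact Or.inr h'

-- last-match fold: a matching key forces a some result
theorem pvLM_mem (keys : List String) (cl : String) (acc : Option String) (k : String)
    (hk : k ∈ keys) (hl : PySem.Str.lower k = cl) :
    ∃ v, keys.foldl (fun acc k => if PySem.Str.lower k = cl then some k else acc) acc = some v := by
  cases hres : keys.foldl (fun acc k => if PySem.Str.lower k = cl then some k else acc) acc with
  | some v => exact ⟨v, rfl⟩
  | none =>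
    rcases (pvLM_none_iff keys cl acc).1 hres with ⟨-, hall⟩
    exact absurd hl (hall k hk)

-- pvFirstIdx: some j splits the list at a matching element
theorem pvFI_some_split (s : String) (cs : List String) (j : Nat)
    (h : pvFirstIdx s cs = some j) :
    ∃ pre c post, cs = pre ++ c :: post ∧ pre.length = j ∧ PySem.Str.lower c = s := by
  induction cs generalizing j with
  | nil => cases h
  | cons c cs ih =>
    by_cases hc : PySem.Str.lower c = s
    · refine ⟨[], c, cs, rfl, ?_, hc⟩
      simp [pvFirstIdx, hc] at h
      simp [← h]
    · simp only [pvFirstIdx, if_neg hc, Option.map_eq_some_iff] at h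
      rcases h with ⟨j', hj', rfl⟩
      rcases ih j' hj' with ⟨pre, c', post, rfl, hlen, hl⟩
      exact ⟨c :: pre, c', post, rfl, by simp [hlen], hl⟩

-- pvFirstIdx: none iff no candidate matches
theorem pvFI_none_iff (s : String) (cs : List String) :
    pvFirstIdx s cs = none ↔ ∀ c ∈ cs, PySem.Str.lower c ≠ s := by
  induction cs with
  | nil => simp [pvFirstIdx]
  | cons c cs ih =>
    by_cases hc : PySem.Str.lower c = s <;> simp [pvFirstIdx, hc, ih]

-- a match inside a prefix bounds pvFirstIdx below the prefix length
theorem pvFI_lt_of_mem_prefix (s : String) (pre rest : List String) (c : String)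
    (hc : c ∈ pre) (hl : PySem.Str.lower c = s) :
    ∃ j < pre.length, pvFirstIdx s (pre ++ rest) = some j := by
  induction pre with
  | nil => cases hc
  | cons p pre ih =>
    by_cases hp : PySem.Str.lower p = s
    · exact ⟨0, by simp, by simp [pvFirstIdx, hp]⟩
    · rcases List.mem_cons.1 hc with rfl | hc'
      · exact absurd hl hp
      · rcases ih hc' with ⟨j, hj, hfi⟩
        exact ⟨j + 1, by simpa using Nat.succ_lt_succ hj,
          by simp [pvFirstIdx, hp, hfi]⟩

-- B's argmin fold: none iff nothing matches (and the accumulator is none)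
theorem pvBF_none_iff (rank : PySem.Dict String Int) (keys : List String)
    (acc : Option (Int × String)) :
    keys.foldl (pvBStep rank) acc = none ↔
      acc = none ∧ ∀ k ∈ keys, rank.get? (PySem.Str.lower k) = none := by
  induction keys generalizing acc with
  | nil => simp
  | cons k ks ih =>
    simp only [List.foldl_cons, ih, List.mem_cons]
    constructor
    · rintro ⟨hstep, hall⟩
      unfold pvBStep at hstep
      cases hg : rank.get? (PySem.Str.lower k) with
      | none => simp [hg] at hstep; exact ⟨hstep, fun k' hk' => hk'.elim (fun he => he ▸ hg) (hall k')⟩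
      | some i => cases acc <;> simp [hg] at hstep <;> try (split at hstep <;> simp_all)
    · rintro ⟨rfl, hall⟩
      have hg := hall k (Or.inl rfl)
      exact ⟨by simp [pvBStep, hg], fun k' hk' => hall k' (Or.inr hk')⟩

-- B's argmin fold: a result is a matching key of minimal rank (or the accumulator)
theorem pvBF_some (rank : PySem.Dict String Int) (keys : List String)
    (acc : Option (Int × String)) (i : Int) (k : String)
    (h : keys.foldl (pvBStep rank) acc = some (i, k)) :
    ((k ∈ keys ∧ rank.get? (PySem.Str.lower k) = some i) ∨ acc = some (i, k)) ∧
      (∀ k' ∈ keys, ∀ i', rank.get? (PySem.Str.lower k') = some i' → i ≤ i') ∧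
      (∀ b, acc = some b → i ≤ b.1) := by
  induction keys generalizing acc with
  | nil => exact ⟨Or.inr h, by simp, fun b hb => by simp [hb] at h; simp [h]⟩
  | cons k0 ks ih =>
    simp only [List.foldl_cons] at h
    rcases ih _ h with ⟨hmem, hmin, haccle⟩
    have hstep : ∀ i0, rank.get? (PySem.Str.lower k0) = some i0 →
        ∃ b', pvBStep rank acc k0 = some b' ∧ b'.1 ≤ i0 ∧ (∀ b, acc = some b → b'.1 ≤ b.1) := by
      intro i0 hg
      unfold pvBStep; rw [hg]
      cases acc with
      | none => exact ⟨(i0, k0), rfl, le_refl _, by simp⟩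
      | some b =>
        by_cases hlt : i0 < b.1
        · exact ⟨(i0, k0), by simp [hlt], le_refl _,
            by intro b2 hb2; injection hb2 with hb2; subst hb2; simp; omega⟩
        · exact ⟨b, by simp [hlt], by omega,
            by intro b2 hb2; injection hb2 with hb2; subst hb2; exact le_refl _⟩
    refine ⟨?_, ?_, ?_⟩
    · rcases hmem with h' | h'
      · exact Or.inl ⟨List.mem_cons_of_mem _ h'.1, h'.2⟩
      · -- pvBStep rank acc k0 = some (i, k)
        unfold pvBStep at h'
        cases hg : rank.get? (PySem.Str.lower k0) with
        | none => rw [hg] at h'; exact Or.inr h'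
        | some i0 =>
          rw [hg] at h'
          cases acc with
          | none =>
            simp at h'
            exact Or.inl ⟨by simp [h'.2.symm], by rw [← h'.2]; rw [hg, h'.1]⟩
          | some b =>
            by_cases hlt : i0 < b.1
            · simp [hlt] at h'
              exact Or.inl ⟨by simp [h'.2.symm], by rw [← h'.2]; rw [hg, h'.1]⟩
            · simp [hlt] at h'
              exact Or.inr (by simp [h'])
    · intro k' hk' i' hg'
      rcases List.mem_cons.1 hk' with rfl | hk''
      · rcases hstep i' hg' with ⟨b', hb', hle, _⟩
        exact le_trans (haccle b' hb') hle
      · exact hmin k' hk'' i' hg'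
    · intro b hb
      cases hg : rank.get? (PySem.Str.lower k0) with
      | none =>
        have hstep0 : pvBStep rank acc k0 = acc := by simp [pvBStep, hg]
        exact haccle b (by rw [hstep0, hb])
      | some i0 =>
        rcases hstep i0 hg with ⟨b', hb', _, hble⟩
        exact le_trans (haccle b' hb') (hble b hb)

-- A's exact loop: none iff every candidate misses
theorem pvAExact_none_iff (low : PySem.Dict String String) (cs : List String) :
    pvAExact low cs = none ↔ ∀ c ∈ cs, low.get? (PySem.Str.lower c) = none := by
  induction cs with
  | nil => simp [pvAExact]
  | cons c cs ih =>
    cases hg : low.get? (PySem.Str.lower c) <;> simp [pvAExact, hg, ih]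

-- A's exact loop returns the first hit
theorem pvAExact_split (low : PySem.Dict String String) (pre : List String) (c : String)
    (post : List String) (v : String)
    (hpre : ∀ c' ∈ pre, low.get? (PySem.Str.lower c') = none)
    (hc : low.get? (PySem.Str.lower c) = some v) :
    pvAExact low (pre ++ c :: post) = some v := by
  induction pre with
  | nil => simp [pvAExact, hc]
  | cons p pre ih =>
    have hp := hpre p (List.mem_cons_self)
    simp only [List.cons_append, pvAExact, hp]
    exact ih (fun c' hc' => hpre c' (List.mem_cons_of_mem _ hc'))

-- the fuzzy fallback: find? = A's loop
theorem pvFuzzy_eq (tokens : List String) (keys : List String) :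
    keys.find? (fun k => tokens.all (fun t => PySem.Str.isIn t (PySem.Str.lower k))) =
      pvAFuzzy tokens keys := by
  induction keys with
  | nil => rfl
  | cons k ks ih =>
    simp only [List.find?, pvAFuzzy, ih]
    cases h : tokens.all (fun t => PySem.Str.isIn t (PySem.Str.lower k)) <;>
      simp [PySem.Str.isIn] at h ⊢ <;> simp [h]

-- ===== VERDICT (by name: the statement is the Claim_ definition above) =====
theorem find_label_key_py_spec : Claim_equal_find_label_key_py := by
  intro candidates available_keys _ hcnt
  unfold Pre_find_label_key_py at hcnt
  unfold Spec_find_label_key_py find_label_key_py find_label_key_py_alt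
  dsimp only
  have hlow : ∀ cl, (available_keys.foldl (fun d k => d.insert (PySem.Str.lower k) k)
      PySem.Dict.empty).get? cl =
      available_keys.foldl (fun acc k => if PySem.Str.lower k = cl then some k else acc) none :=
    fun cl => pvLow_get?_eq available_keys cl _
  have hrank : ∀ s, (pvBRank candidates).get? s = Option.map (fun j : Nat => (j : Int)) (pvFirstIdx s candidates) := by
    intro s
    unfold pvBRank
    rw [pvRank_get?_eq]
    cases h : pvFirstIdx s candidates <;> simp [h]
  cases hbf : available_keys.foldl (pvBStep (pvBRank candidates)) none with
  | none =>
    -- no key's lowercase occurs among the candidates: A's exact loop also misses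
    rcases (pvBF_none_iff _ _ _).1 hbf with ⟨-, hall⟩
    have hnomatch : ∀ c ∈ candidates, ∀ k ∈ available_keys,
        PySem.Str.lower k ≠ PySem.Str.lower c := by
      intro c hc k hk he
      have := hall k hk
      rw [hrank] at this
      rw [Option.map_eq_none_iff] at this
      exact (pvFI_none_iff _ _).1 this c hc he.symm
    have hA : pvAExact (available_keys.foldl (fun d k => d.insert (PySem.Str.lower k) k)
        PySem.Dict.empty) candidates = none := by
      rw [pvAExact_none_iff]
      intro c hc
      rw [hlow, pvLM_none_iff]
      exact ⟨rfl, fun k hk => hnomatch c hc k hk⟩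
    rw [hA]
    exact (pvFuzzy_eq _ _).symm
  | some b =>
    obtain ⟨i, k⟩ := b
    rcases pvBF_some _ _ _ _ _ hbf with ⟨hmem, hmin, -⟩
    rcases hmem with ⟨hk, hg⟩ | hcon
    · rw [hrank, Option.map_eq_some_iff] at hg
      rcases hg with ⟨j, hfi, rfl⟩
      rcases pvFI_some_split _ _ _ hfi with ⟨pre, c, post, hsplit, hlen, hlc⟩
      -- earlier candidates are missed by every key
      have hpre : ∀ c' ∈ pre, (available_keys.foldl (fun d k => d.insert (PySem.Str.lower k) k)
          PySem.Dict.empty).get? (PySem.Str.lower c') = none := by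
        intro c' hc'
        rw [hlow, pvLM_none_iff]
        refine ⟨rfl, fun k' hk' he => ?_⟩
        rcases pvFI_lt_of_mem_prefix (PySem.Str.lower k') pre (c :: post) c' hc' he.symm
          with ⟨j', hj', hfi'⟩
        have hg' : (pvBRank candidates).get? (PySem.Str.lower k') = some (j' : Int) := by
          rw [hrank, hsplit, hfi']; rfl
        have := hmin k' hk' _ hg'
        rw [hlen] at hj'
        omega
      -- candidate c is matched exactly by k
      have hcK : (available_keys.foldl (fun d k => d.insert (PySem.Str.lower k) k)
          PySem.Dict.empty).get? (PySem.Str.lower c) = some k := by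
        rw [hlow]
        rcases pvLM_mem available_keys (PySem.Str.lower c) none k hk (by rw [hlc]) with ⟨v, hv⟩
        rcases pvLM_some _ _ _ _ hv with ⟨hvmem, hvl⟩ | hcon'
        · have hcmem : c ∈ candidates := by
            rw [hsplit]; exact List.mem_append.2 (Or.inr List.mem_cons_self)
          have : v = k := hcnt c hcmem v hvmem k hk hvl hlc.symm
          rw [hv, this]
        · cases hcon'
      rw [hsplit, pvAExact_split _ pre c post k hpre hcK]
    · cases hcon
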